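-- pv_equiv track=rewrite | github.com/maxhutch/forge | forge/mdf_forge/forge.py | __clean_query_string
-- ===== SOURCE A (Python) =====
-- def __clean_query_string(q):
--     """Clean up a query string.
--     This method does not access self, so that a search will not change state.
--     """
--     q = q.strip().replace("()", "")
--     if q.endswith("("):
--         q = q[:-1]
--     # Remove misplaced AND/OR at end
--     if q[-3:] == "AND":
--         q = q[:-3]
--     elif q[-2:] == "OR":
--         q = q[:-2]
--
--     # Balance parentheses
--     while q.count("(") > q.count(")"):
--         q += ")"
--     while q.count(")") > q.count("("):
--         q = "(" + q
--
--     return q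
-- ===== SOURCE B (Python) =====
-- def __clean_query_string(q):
--     """Clean up a query string (closed-form parenthesis balancing)."""
--     q = q.strip().replace("()", "")
--     if q.endswith("("):
--         q = q[:-1]
--     if q[-3:] == "AND":
--         q = q[:-3]
--     elif q[-2:] == "OR":
--         q = q[:-2]
--
--     opens = q.count("(")
--     closes = q.count(")")
--     if opens > closes:
--         q += ")" * (opens - closes)
--     elif closes > opens:
--         q = "(" * (closes - opens) + q
--
--     return q
-- ===== Notes on version B (the rewrite author's own statement) =====
-- stated objective: simpler
-- what changed: Replaces A's two while loops, each recounting both parenthesis kinds on every iteration before adding one character, with a single pair of counts and one closed-form padding of the deficit computed by string multiplication.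
import Mathlib
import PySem

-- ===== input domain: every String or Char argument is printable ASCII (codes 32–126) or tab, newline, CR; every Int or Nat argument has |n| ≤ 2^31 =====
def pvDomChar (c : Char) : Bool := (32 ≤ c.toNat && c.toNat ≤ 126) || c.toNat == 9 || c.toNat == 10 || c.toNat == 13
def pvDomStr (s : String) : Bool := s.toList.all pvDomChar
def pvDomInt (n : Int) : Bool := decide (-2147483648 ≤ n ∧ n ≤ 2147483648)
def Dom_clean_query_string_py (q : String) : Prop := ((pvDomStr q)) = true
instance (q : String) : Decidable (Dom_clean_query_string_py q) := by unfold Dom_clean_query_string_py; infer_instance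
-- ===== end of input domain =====

-- B replaces A's two count-recomputing while loops with one closed-form padding; objective: simpler.

-- Python's s.count(c) for a single character c is the character count
-- (cited by port A's decreasing_by, hence placed above the ports).
theorem count_go_singleton (c : Char) (s : List Char) : ∀ (fuel acc : Nat),
    s.length ≤ fuel → PySem.Chars.count.go [c] fuel s acc = acc + s.count c := by
  induction s with
  | nil =>
    intro fuel acc _
    cases fuel <;> simp [PySem.Chars.count.go]
  | cons h t ih =>
    intro fuel acc hle
    cases fuel with
    | zero => simp at hle
    | succ f =>
      simp only [PySem.Chars.count.go]
      by_cases hc : c = h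
      · subst hc
        rw [show ([c].isPrefixOf (c :: t)) = true from by simp [List.isPrefixOf], if_pos rfl]
        simp only [List.length_cons, List.length_nil, Nat.zero_add, List.drop_succ_cons,
          List.drop_zero]
        rw [ih f (acc + 1) (by simpa using Nat.succ_le_succ_iff.mp hle)]
        simp
        omega
      · rw [show ([c].isPrefixOf (h :: t)) = false from by simp [List.isPrefixOf, hc]]
        simp only [Bool.false_eq_true, if_false]
        rw [ih f acc (by simpa using Nat.succ_le_succ_iff.mp hle)]
        simp only [List.count_cons]
        have : ¬ h = c := fun hh => hc hh.symm
        simp [this]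

theorem count_singleton (s : List Char) (c : Char) :
    PySem.Chars.count s [c] = s.count c := by
  simp only [PySem.Chars.count, List.isEmpty, Bool.false_eq_true, if_false]
  simpa using count_go_singleton c s s.length 0 le_rfl

-- ===== PORT A =====
-- shared front of A's code: strip, remove "()", drop trailing "(", trim trailing AND/OR
def pvTrimFront (s : List Char) : List Char :=
  let q1 := PySem.Chars.replace (PySem.Chars.strip s) ['(', ')'] []
  let q2 := if PySem.Chars.endswith q1 ['('] then PySem.Chars.slice q1 none (some (-1)) else q1
  if PySem.Chars.slice q2 (some (-3)) none = ['A', 'N', 'D'] then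
    PySem.Chars.slice q2 none (some (-3))
  else if PySem.Chars.slice q2 (some (-2)) none = ['O', 'R'] then
    PySem.Chars.slice q2 none (some (-2))
  else q2

-- A's first while loop: while q.count("(") > q.count(")"): q += ")"
def pvBalClose (s : List Char) : List Char :=
  if PySem.Chars.count s ['('] > PySem.Chars.count s [')'] then pvBalClose (s ++ [')'])
  else s
termination_by PySem.Chars.count s ['('] - PySem.Chars.count s [')']
decreasing_by
  simp only [count_singleton, List.count_append] at *
  simp_all
  omega

-- A's second while loop: while q.count(")") > q.count("("): q = "(" + q
def pvBalOpen (s : List Char) : List Char :=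
  if PySem.Chars.count s [')'] > PySem.Chars.count s ['('] then pvBalOpen ('(' :: s)
  else s
termination_by PySem.Chars.count s [')'] - PySem.Chars.count s ['(']
decreasing_by
  simp only [count_singleton, List.count_cons] at *
  simp_all
  omega

def clean_query_string_py (q : String) : String :=
  String.ofList (pvBalOpen (pvBalClose (pvTrimFront q.toList)))

-- ===== PORT B =====
def clean_query_string_py_alt (q : String) : String :=
  let q3 := pvTrimFront q.toList
  let opens := PySem.Chars.count q3 ['(']
  let closes := PySem.Chars.count q3 [')']
  String.ofList
    (if opens > closes then q3 ++ List.replicate (opens - closes) ')'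
     else if closes > opens then List.replicate (closes - opens) '(' ++ q3
     else q3)

-- ===== PRECONDITION & SPEC =====
def Spec_clean_query_string_py (q : String) (out : String) : Prop := out = clean_query_string_py_alt q
instance (q : String) (out : String) : Decidable (Spec_clean_query_string_py q out) := by unfold Spec_clean_query_string_py; infer_instance

-- ===== CLAIM (what is proved, stated in full; the proofs are below) =====
def Claim_equal_clean_query_string_py : Prop := ∀ (q : String), Dom_clean_query_string_py q → Spec_clean_query_string_py q (clean_query_string_py q)

-- ===== LEMMAS AND PROOFS =====

theorem pvBalClose_eq (s : List Char) :
    pvBalClose s = s ++ List.replicate (s.count '(' - s.count ')') ')' := by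
  rw [pvBalClose]
  simp only [count_singleton]
  by_cases h : s.count ')' < s.count '('
  · rw [if_pos h, pvBalClose_eq (s ++ [')'])]
    have hcnt1 : (s ++ [')']).count '(' = s.count '(' := by simp
    have hcnt2 : (s ++ [')']).count ')' = s.count ')' + 1 := by simp
    rw [hcnt1, hcnt2]
    have hd : s.count '(' - s.count ')' = (s.count '(' - (s.count ')' + 1)) + 1 := by omega
    rw [hd, List.replicate_succ, List.append_assoc, List.singleton_append]
  · rw [if_neg (by omega)]
    have h0 : s.count '(' - s.count ')' = 0 := by omega
    simp [h0]
termination_by s.count '(' - s.count ')'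
decreasing_by
  simp
  omega

theorem pvBalOpen_eq (s : List Char) :
    pvBalOpen s = List.replicate (s.count ')' - s.count '(') '(' ++ s := by
  rw [pvBalOpen]
  simp only [count_singleton]
  by_cases h : s.count '(' < s.count ')'
  · rw [if_pos h, pvBalOpen_eq ('(' :: s)]
    have hc1 : ('(' :: s).count ')' = s.count ')' := by simp
    have hc2 : ('(' :: s).count '(' = s.count '(' + 1 := by simp
    rw [hc1, hc2]
    have hd : s.count ')' - s.count '(' = (s.count ')' - (s.count '(' + 1)) + 1 := by omega
    rw [hd, List.replicate_succ']
    simp [List.append_assoc]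
  · rw [if_neg (by omega)]
    have h0 : s.count ')' - s.count '(' = 0 := by omega
    simp [h0]
termination_by s.count ')' - s.count '('
decreasing_by
  simp
  omega

theorem balance_eq (s : List Char) :
    pvBalOpen (pvBalClose s)
      = (if PySem.Chars.count s ['('] > PySem.Chars.count s [')'] then
           s ++ List.replicate (PySem.Chars.count s ['('] - PySem.Chars.count s [')']) ')'
         else if PySem.Chars.count s [')'] > PySem.Chars.count s ['('] then
           List.replicate (PySem.Chars.count s [')'] - PySem.Chars.count s ['(']) '(' ++ s
         else s) := by
  rw [pvBalClose_eq, pvBalOpen_eq]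
  simp [count_singleton, List.count_append, List.count_replicate]
  split_ifs with h1 h2
  · simp
    omega
  · have e1 : s.count '(' - s.count ')' = 0 := by omega
    simp [e1]
  · have e1 : s.count '(' - s.count ')' = 0 := by omega
    have e2 : s.count ')' - s.count '(' = 0 := by omega
    simp [e1, e2]

-- ===== VERDICT (by name: the statement is the Claim_ definition above) =====
theorem clean_query_string_py_spec : Claim_equal_clean_query_string_py := by
  intro q _
  unfold Spec_clean_query_string_py clean_query_string_py clean_query_string_py_alt
  rw [balance_eq]
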